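-- pv_equiv track=rewrite | github.com/Xavier-MaYiMing/A-two-stage-algorithm-for-flexible-process-planning | src/HEA.py | find_mutation_range
-- ===== SOURCE A (Python) =====
-- def find_mutation_range(sol, closure_pairs, idx):
--     # find the mutation range
--     idx1, idx2 = idx, idx
--     while idx1 - 1 >= 0 and (sol[idx1 - 1], sol[idx]) not in closure_pairs:
--         flag = False
--         for i in range(idx1, idx):
--             if (sol[idx1 - 1], sol[i]) in closure_pairs:
--                 flag = True
--                 break
--         if flag:
--             break
--         idx1 -= 1
--     while idx2 + 1 < len(sol) and (sol[idx], sol[idx2 + 1]) not in closure_pairs: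
--         flag = False
--         for i in range(idx + 1, idx2 + 1):
--             if (sol[i], sol[idx2 + 1]) in closure_pairs:
--                 flag = True
--                 break
--         if flag:
--             break
--         idx2 += 1
--     return [i for i in range(idx1, idx2 + 1) if i != idx]
-- ===== SOURCE B (Python) =====
-- def find_mutation_range(sol, closure_pairs, idx):
--     # Incremental blocker sets: one pass per direction, no rescans of the window.
--     n = len(sol)
--     blockers = {a for (a, b) in closure_pairs if b == sol[idx]}
--     idx1 = idx
--     while idx1 - 1 >= 0 and sol[idx1 - 1] not in blockers:
--         idx1 -= 1
--         blockers |= {a for (a, b) in closure_pairs if b == sol[idx1]}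
--     followers = {b for (a, b) in closure_pairs if a == sol[idx]}
--     idx2 = idx
--     while idx2 + 1 < n and sol[idx2 + 1] not in followers:
--         idx2 += 1
--         followers |= {b for (a, b) in closure_pairs if a == sol[idx2]}
--     return [i for i in range(idx1, idx2 + 1) if i != idx]
-- ===== Notes on version B (the rewrite author's own statement) =====
-- stated objective: faster
-- what changed: Replaces A's per-step rescan of the whole window (with O(p) list membership tests inside) by an incrementally maintained set of blocking/following partner values, so each extension step costs one set lookup plus one scan of closure_pairs.
-- outside the precondition, e.g. on find_mutation_range([], {(19, 0)}, -1): A returns [], B raises IndexError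
import Mathlib
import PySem

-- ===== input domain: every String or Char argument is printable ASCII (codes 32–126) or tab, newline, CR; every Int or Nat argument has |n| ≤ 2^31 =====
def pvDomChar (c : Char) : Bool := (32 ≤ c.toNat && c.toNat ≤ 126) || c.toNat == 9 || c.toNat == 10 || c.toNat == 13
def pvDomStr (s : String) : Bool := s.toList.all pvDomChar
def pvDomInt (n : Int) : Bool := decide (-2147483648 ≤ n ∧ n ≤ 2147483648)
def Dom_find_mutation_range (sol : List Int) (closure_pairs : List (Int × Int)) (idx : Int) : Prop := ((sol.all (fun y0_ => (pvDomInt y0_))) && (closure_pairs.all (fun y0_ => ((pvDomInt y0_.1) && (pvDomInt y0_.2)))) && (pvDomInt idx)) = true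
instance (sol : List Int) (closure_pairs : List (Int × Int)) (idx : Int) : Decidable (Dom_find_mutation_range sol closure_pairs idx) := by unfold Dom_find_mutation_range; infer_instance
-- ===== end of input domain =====

-- B replaces A's per-step rescan of the window by an incrementally maintained set of partner values (faster).


-- ===== PORT A =====
-- sol[i] (Python wraps negative indexes); total via default 0, exact under Pre_ (in-range accesses only)
def pvGet (sol : List Int) (i : Int) : Int := PySem.List.pyGetD sol i 0

-- first while loop of A: extend idx1 left, rescanning the window [idx1, idx) each step
def leftA (sol : List Int) (closure_pairs : List (Int × Int)) (idx : Int) : Nat → Int → Int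
  | 0, idx1 => idx1
  | f + 1, idx1 =>
    if idx1 - 1 ≥ 0 ∧ ¬ ((pvGet sol (idx1 - 1), pvGet sol idx) ∈ closure_pairs) then
      if (PySem.List.pyRange idx1 idx 1).any
          (fun i => decide ((pvGet sol (idx1 - 1), pvGet sol i) ∈ closure_pairs)) then
        idx1   -- flag: break
      else leftA sol closure_pairs idx f (idx1 - 1)
    else idx1

-- second while loop of A: extend idx2 right, rescanning the window (idx, idx2] each step
def rightA (sol : List Int) (closure_pairs : List (Int × Int)) (idx : Int) : Nat → Int → Int
  | 0, idx2 => idx2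
  | f + 1, idx2 =>
    if idx2 + 1 < (sol.length : Int) ∧ ¬ ((pvGet sol idx, pvGet sol (idx2 + 1)) ∈ closure_pairs) then
      if (PySem.List.pyRange (idx + 1) (idx2 + 1) 1).any
          (fun i => decide ((pvGet sol i, pvGet sol (idx2 + 1)) ∈ closure_pairs)) then
        idx2   -- flag: break
      else rightA sol closure_pairs idx f (idx2 + 1)
    else idx2

def find_mutation_range (sol : List Int) (closure_pairs : List (Int × Int)) (idx : Int) : List Int :=
  let idx1 := leftA sol closure_pairs idx (2 * sol.length) idx
  let idx2 := rightA sol closure_pairs idx (2 * sol.length) idx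
  (PySem.List.pyRange idx1 (idx2 + 1) 1).filter (fun i => decide (i ≠ idx))

-- ===== PORT B =====
-- {a for (a, b) in closure_pairs if b == v}
def predsOf (closure_pairs : List (Int × Int)) (v : Int) : List Int :=
  (closure_pairs.filter (fun p => p.2 == v)).map Prod.fst

-- {b for (a, b) in closure_pairs if a == v}
def succsOf (closure_pairs : List (Int × Int)) (v : Int) : List Int :=
  (closure_pairs.filter (fun p => p.1 == v)).map Prod.snd

-- B's left loop: blockers grow incrementally, one set lookup per step
def leftB (sol : List Int) (closure_pairs : List (Int × Int)) : Nat → Int → PySem.Set Int → Int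
  | 0, idx1, _ => idx1
  | f + 1, idx1, blockers =>
    if idx1 - 1 ≥ 0 ∧ ¬ (pvGet sol (idx1 - 1) ∈ blockers) then
      leftB sol closure_pairs f (idx1 - 1)
        (PySem.Set.union blockers (PySem.Set.ofList (predsOf closure_pairs (pvGet sol (idx1 - 1)))))
    else idx1

-- B's right loop: followers grow incrementally
def rightB (sol : List Int) (closure_pairs : List (Int × Int)) : Nat → Int → PySem.Set Int → Int
  | 0, idx2, _ => idx2
  | f + 1, idx2, followers =>
    if idx2 + 1 < (sol.length : Int) ∧ ¬ (pvGet sol (idx2 + 1) ∈ followers) then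
      rightB sol closure_pairs f (idx2 + 1)
        (PySem.Set.union followers (PySem.Set.ofList (succsOf closure_pairs (pvGet sol (idx2 + 1)))))
    else idx2

def find_mutation_range_alt (sol : List Int) (closure_pairs : List (Int × Int)) (idx : Int) : List Int :=
  let idx1 := leftB sol closure_pairs (2 * sol.length) idx
                (PySem.Set.ofList (predsOf closure_pairs (pvGet sol idx)))
  let idx2 := rightB sol closure_pairs (2 * sol.length) idx
                (PySem.Set.ofList (succsOf closure_pairs (pvGet sol idx)))
  (PySem.List.pyRange idx1 (idx2 + 1) 1).filter (fun i => decide (i ≠ idx))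

-- ===== PRECONDITION & SPEC =====
-- Pre_ requires idx to be a valid (possibly negative) index into sol: outside it Python A raises IndexError,
-- except on empty sol with idx <= 0, where A's short-circuited guards never index and it returns [] while B raises IndexError on sol[idx].
def Pre_find_mutation_range (sol : List Int) (closure_pairs : List (Int × Int)) (idx : Int) : Prop :=
  -(sol.length : Int) ≤ idx ∧ idx < (sol.length : Int)
instance (sol : List Int) (closure_pairs : List (Int × Int)) (idx : Int) : Decidable (Pre_find_mutation_range sol closure_pairs idx) := by unfold Pre_find_mutation_range; infer_instance

def pvWitness_find_mutation_range : List Int × (List (Int × Int)) × Int := ([1, 2, 3], [(1, 3)], 1)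

def Spec_find_mutation_range (sol : List Int) (closure_pairs : List (Int × Int)) (idx : Int) (out : List Int) : Prop := out = find_mutation_range_alt sol closure_pairs idx
instance (sol : List Int) (closure_pairs : List (Int × Int)) (idx : Int) (out : List Int) : Decidable (Spec_find_mutation_range sol closure_pairs idx out) := by unfold Spec_find_mutation_range; infer_instance

-- ===== CLAIM (what is proved, stated in full; the proofs are below) =====
def Claim_equal_find_mutation_range : Prop := ∀ (sol : List Int) (closure_pairs : List (Int × Int)) (idx : Int), Dom_find_mutation_range sol closure_pairs idx → Pre_find_mutation_range sol closure_pairs idx → Spec_find_mutation_range sol closure_pairs idx (find_mutation_range sol closure_pairs idx)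

-- ===== LEMMAS AND PROOFS =====

theorem mem_predsOf (closure_pairs : List (Int × Int)) (v x : Int) :
    x ∈ predsOf closure_pairs v ↔ (x, v) ∈ closure_pairs := by
  unfold predsOf
  simp only [List.mem_map, List.mem_filter, beq_iff_eq]
  constructor
  · rintro ⟨⟨a, b⟩, ⟨hm, hb⟩, hx⟩
    simp_all
  · intro h
    exact ⟨(x, v), ⟨h, rfl⟩, rfl⟩

theorem mem_succsOf (closure_pairs : List (Int × Int)) (v x : Int) :
    x ∈ succsOf closure_pairs v ↔ (v, x) ∈ closure_pairs := by
  unfold succsOf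
  simp only [List.mem_map, List.mem_filter, beq_iff_eq]
  constructor
  · rintro ⟨⟨a, b⟩, ⟨hm, ha⟩, hx⟩
    simp_all
  · intro h
    exact ⟨(v, x), ⟨h, rfl⟩, rfl⟩

theorem left_eq (sol : List Int) (cps : List (Int × Int)) (idx : Int) :
    ∀ (f : Nat) (idx1 : Int) (bl : PySem.Set Int), idx1 ≤ idx →
      (∀ x, x ∈ bl ↔ ∃ j, idx1 ≤ j ∧ j ≤ idx ∧ (x, pvGet sol j) ∈ cps) →
      leftA sol cps idx f idx1 = leftB sol cps f idx1 bl := by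
  intro f
  induction f with
  | zero => intro idx1 bl _ _; rfl
  | succ f ih =>
    intro idx1 bl h1 hinv
    have hguard : ((pvGet sol (idx1 - 1), pvGet sol idx) ∈ cps ∨
        (PySem.List.pyRange idx1 idx 1).any
          (fun i => decide ((pvGet sol (idx1 - 1), pvGet sol i) ∈ cps)) = true)
        ↔ pvGet sol (idx1 - 1) ∈ bl := by
      rw [hinv]
      constructor
      · rintro (h | h)
        · exact ⟨idx, h1, le_refl _, h⟩
        · rcases List.any_eq_true.mp h with ⟨j, hj, hp⟩
          rw [PySem.List.mem_pyRange_one] at hj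
          exact ⟨j, hj.1, by omega, of_decide_eq_true hp⟩
      · rintro ⟨j, hj1, hj2, hp⟩
        by_cases hje : j = idx
        · left; rw [← hje]; exact hp
        · right
          exact List.any_eq_true.mpr ⟨j, PySem.List.mem_pyRange_one.mpr ⟨hj1, by omega⟩,
            decide_eq_true hp⟩
    simp only [leftA, leftB]
    by_cases hge : idx1 - 1 ≥ 0
    · by_cases hbl : pvGet sol (idx1 - 1) ∈ bl
      · -- A breaks (via guard or flag); B stops
        rcases hguard.mpr hbl with h | h
        · rw [if_neg (by tauto), if_neg (by tauto)]
        · by_cases hm : (pvGet sol (idx1 - 1), pvGet sol idx) ∈ cps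
          · rw [if_neg (by tauto), if_neg (by tauto)]
          · rw [if_pos ⟨hge, hm⟩, if_pos h, if_neg (by tauto)]
      · -- both continue
        have hm : ¬ ((pvGet sol (idx1 - 1), pvGet sol idx) ∈ cps) := fun h => hbl (hguard.mp (Or.inl h))
        have hany : ¬ ((PySem.List.pyRange idx1 idx 1).any
            (fun i => decide ((pvGet sol (idx1 - 1), pvGet sol i) ∈ cps)) = true) :=
          fun h => hbl (hguard.mp (Or.inr h))
        rw [if_pos ⟨hge, hm⟩, if_neg hany, if_pos ⟨hge, hbl⟩]
        apply ih
        · omega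
        · intro x
          rw [PySem.Set.mem_union, hinv, PySem.Set.mem_ofList, mem_predsOf]
          constructor
          · rintro (⟨j, hj1, hj2, hp⟩ | hp)
            · exact ⟨j, by omega, hj2, hp⟩
            · exact ⟨idx1 - 1, le_refl _, by omega, hp⟩
          · rintro ⟨j, hj1, hj2, hp⟩
            by_cases hje : j = idx1 - 1
            · right; rw [← hje]; exact hp
            · left; exact ⟨j, by omega, hj2, hp⟩
    · rw [if_neg (by tauto), if_neg (by tauto)]

theorem right_eq (sol : List Int) (cps : List (Int × Int)) (idx : Int) :
    ∀ (f : Nat) (idx2 : Int) (fl : PySem.Set Int), idx ≤ idx2 →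
      (∀ x, x ∈ fl ↔ ∃ j, idx ≤ j ∧ j ≤ idx2 ∧ (pvGet sol j, x) ∈ cps) →
      rightA sol cps idx f idx2 = rightB sol cps f idx2 fl := by
  intro f
  induction f with
  | zero => intro idx2 fl _ _; rfl
  | succ f ih =>
    intro idx2 fl h1 hinv
    have hguard : ((pvGet sol idx, pvGet sol (idx2 + 1)) ∈ cps ∨
        (PySem.List.pyRange (idx + 1) (idx2 + 1) 1).any
          (fun i => decide ((pvGet sol i, pvGet sol (idx2 + 1)) ∈ cps)) = true)
        ↔ pvGet sol (idx2 + 1) ∈ fl := by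
      rw [hinv]
      constructor
      · rintro (h | h)
        · exact ⟨idx, le_refl _, h1, h⟩
        · rcases List.any_eq_true.mp h with ⟨j, hj, hp⟩
          rw [PySem.List.mem_pyRange_one] at hj
          exact ⟨j, by omega, by omega, of_decide_eq_true hp⟩
      · rintro ⟨j, hj1, hj2, hp⟩
        by_cases hje : j = idx
        · left; rw [← hje]; exact hp
        · right
          exact List.any_eq_true.mpr ⟨j, PySem.List.mem_pyRange_one.mpr ⟨by omega, by omega⟩,
            decide_eq_true hp⟩
    simp only [rightA, rightB]
    by_cases hge : idx2 + 1 < (sol.length : Int)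
    · by_cases hfl : pvGet sol (idx2 + 1) ∈ fl
      · rcases hguard.mpr hfl with h | h
        · rw [if_neg (by tauto), if_neg (by tauto)]
        · by_cases hm : (pvGet sol idx, pvGet sol (idx2 + 1)) ∈ cps
          · rw [if_neg (by tauto), if_neg (by tauto)]
          · rw [if_pos ⟨hge, hm⟩, if_pos h, if_neg (by tauto)]
      · have hm : ¬ ((pvGet sol idx, pvGet sol (idx2 + 1)) ∈ cps) := fun h => hfl (hguard.mp (Or.inl h))
        have hany : ¬ ((PySem.List.pyRange (idx + 1) (idx2 + 1) 1).any
            (fun i => decide ((pvGet sol i, pvGet sol (idx2 + 1)) ∈ cps)) = true) :=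
          fun h => hfl (hguard.mp (Or.inr h))
        rw [if_pos ⟨hge, hm⟩, if_neg hany, if_pos ⟨hge, hfl⟩]
        apply ih
        · omega
        · intro x
          rw [PySem.Set.mem_union, hinv, PySem.Set.mem_ofList, mem_succsOf]
          constructor
          · rintro (⟨j, hj1, hj2, hp⟩ | hp)
            · exact ⟨j, hj1, by omega, hp⟩
            · exact ⟨idx2 + 1, by omega, le_refl _, hp⟩
          · rintro ⟨j, hj1, hj2, hp⟩
            by_cases hje : j = idx2 + 1
            · right; rw [← hje]; exact hp
            · left; exact ⟨j, hj1, by omega, hp⟩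
    · rw [if_neg (by tauto), if_neg (by tauto)]

-- ===== VERDICT (by name: the statement is the Claim_ definition above) =====
theorem find_mutation_range_spec : Claim_equal_find_mutation_range := by
  intro sol closure_pairs idx _ _
  unfold Spec_find_mutation_range find_mutation_range find_mutation_range_alt
  rw [left_eq sol closure_pairs idx (2 * sol.length) idx
        (PySem.Set.ofList (predsOf closure_pairs (pvGet sol idx))) (le_refl _)
        (by intro x
            rw [PySem.Set.mem_ofList, mem_predsOf]
            constructor
            · intro h; exact ⟨idx, le_refl _, le_refl _, h⟩
            · rintro ⟨j, hj1, hj2, hp⟩; have : j = idx := by omega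
              rw [← this]; exact hp),
      right_eq sol closure_pairs idx (2 * sol.length) idx
        (PySem.Set.ofList (succsOf closure_pairs (pvGet sol idx))) (le_refl _)
        (by intro x
            rw [PySem.Set.mem_ofList, mem_succsOf]
            constructor
            · intro h; exact ⟨idx, le_refl _, le_refl _, h⟩
            · rintro ⟨j, hj1, hj2, hp⟩; have : j = idx := by omega
              rw [← this]; exact hp)]
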